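-- pv_equiv track=rewrite | github.com/ameo-coder/Gestion-documentaire-pour-cabinet-d-avocats | server.py | deviner_categorie
-- ===== SOURCE A (Python) =====
-- def deviner_categorie(chemin, nom_fichier):
--     chemin_lower = chemin.lower()
--     nom_lower = nom_fichier.lower()
--
--     if any(mot in chemin_lower for mot in ['contrat', 'agreement', 'convention']):
--         return "Contrats"
--     elif any(mot in chemin_lower for mot in ['facture', 'invoice', 'paiement']):
--         return "Factures"
--     elif any(mot in chemin_lower for mot in ['courrier', 'mail', 'email', 'lettre']):
--         return "Correspondance"
--     elif any(mot in chemin_lower for mot in ['jugement', 'tribunal', 'audience']):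
--         return "Décisions"
--     elif any(mot in nom_lower for mot in ['contrat', 'agreement']):
--         return "Contrats"
--     elif any(mot in nom_lower for mot in ['facture', 'invoice']):
--         return "Factures"
--     else:
--         return "Divers"
-- ===== SOURCE B (Python) =====
-- _CHEMIN_KEYWORDS = [
--     ('contrat', 0), ('agreement', 0), ('convention', 0),
--     ('facture', 1), ('invoice', 1), ('paiement', 1),
--     ('courrier', 2), ('mail', 2), ('email', 2), ('lettre', 2),
--     ('jugement', 3), ('tribunal', 3), ('audience', 3),
-- ]
-- _NOM_KEYWORDS = [('contrat', 4), ('agreement', 4), ('facture', 5), ('invoice', 5)]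
-- _CATEGORIES = ["Contrats", "Factures", "Correspondance", "Décisions",
--                "Contrats", "Factures", "Divers"]
--
--
-- def deviner_categorie(chemin, nom_fichier):
--     # Scan every keyword, keep the best (lowest) matched priority, then
--     # translate that priority to its category; no early return.
--     chemin_lower = chemin.lower()
--     nom_lower = nom_fichier.lower()
--     best = 6
--     for mot, prio in _CHEMIN_KEYWORDS:
--         if mot in chemin_lower and prio < best:
--             best = prio
--     for mot, prio in _NOM_KEYWORDS:
--         if mot in nom_lower and prio < best:
--             best = prio
--     return _CATEGORIES[best]
-- ===== Notes on version B (the rewrite author's own statement) =====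
-- stated objective: alternative
-- what changed: Replaces A's six-branch early-return if/elif chain by a single full scan of a flat keyword->priority table with a running-minimum accumulator (no early exit), then maps the best matched priority to its category.
import Mathlib
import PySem

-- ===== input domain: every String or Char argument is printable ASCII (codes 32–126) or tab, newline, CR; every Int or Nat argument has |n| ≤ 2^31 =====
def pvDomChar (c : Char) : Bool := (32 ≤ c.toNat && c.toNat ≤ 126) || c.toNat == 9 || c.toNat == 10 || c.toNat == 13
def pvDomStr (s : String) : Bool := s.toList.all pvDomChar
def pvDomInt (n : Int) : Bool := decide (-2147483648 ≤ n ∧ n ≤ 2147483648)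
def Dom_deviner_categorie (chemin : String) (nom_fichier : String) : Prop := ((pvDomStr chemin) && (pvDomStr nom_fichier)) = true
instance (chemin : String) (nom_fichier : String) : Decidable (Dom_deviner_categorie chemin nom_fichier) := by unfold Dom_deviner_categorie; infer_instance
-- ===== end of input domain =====

-- B replaces A's early-return if/elif chain by a full scan of a flat keyword→priority
-- list with a running-minimum accumulator, then maps the best priority to its category
-- (objective: alternative — no early exit, a different decomposition, same cost).

-- ===== PORT A =====
def deviner_categorie (chemin : String) (nom_fichier : String) : String :=
  let chemin_lower := PySem.Str.lower chemin
  let nom_lower := PySem.Str.lower nom_fichier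
  if ["contrat", "agreement", "convention"].any (fun mot => PySem.Str.isIn mot chemin_lower) then "Contrats"
  else if ["facture", "invoice", "paiement"].any (fun mot => PySem.Str.isIn mot chemin_lower) then "Factures"
  else if ["courrier", "mail", "email", "lettre"].any (fun mot => PySem.Str.isIn mot chemin_lower) then "Correspondance"
  else if ["jugement", "tribunal", "audience"].any (fun mot => PySem.Str.isIn mot chemin_lower) then "Décisions"
  else if ["contrat", "agreement"].any (fun mot => PySem.Str.isIn mot nom_lower) then "Contrats"
  else if ["facture", "invoice"].any (fun mot => PySem.Str.isIn mot nom_lower) then "Factures"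
  else "Divers"

-- ===== PORT B =====
def pvChemKeywords : List (String × Nat) :=
  [("contrat", 0), ("agreement", 0), ("convention", 0),
   ("facture", 1), ("invoice", 1), ("paiement", 1),
   ("courrier", 2), ("mail", 2), ("email", 2), ("lettre", 2),
   ("jugement", 3), ("tribunal", 3), ("audience", 3)]
def pvNomKeywords : List (String × Nat) :=
  [("contrat", 4), ("agreement", 4), ("facture", 5), ("invoice", 5)]
def pvCategories : List String :=
  ["Contrats", "Factures", "Correspondance", "Décisions", "Contrats", "Factures", "Divers"]

-- the body of Source B's for-loops: keep the smaller matched priority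
def pvStep (t : String) (best : Nat) (p : String × Nat) : Nat :=
  if PySem.Str.isIn p.1 t && decide (p.2 < best) then p.2 else best

def deviner_categorie_alt (chemin : String) (nom_fichier : String) : String :=
  let chemin_lower := PySem.Str.lower chemin
  let nom_lower := PySem.Str.lower nom_fichier
  let best1 := pvChemKeywords.foldl (pvStep chemin_lower) 6
  let best2 := pvNomKeywords.foldl (pvStep nom_lower) best1
  -- _CATEGORIES[best]; exact: best is always in [0, 6], so Python's list indexing never raises
  pvCategories.getD best2 ""

-- ===== PRECONDITION & SPEC =====
def Spec_deviner_categorie (chemin : String) (nom_fichier : String) (out : String) : Prop := out = deviner_categorie_alt chemin nom_fichier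
instance (chemin : String) (nom_fichier : String) (out : String) : Decidable (Spec_deviner_categorie chemin nom_fichier out) := by unfold Spec_deviner_categorie; infer_instance

-- ===== CLAIM (what is proved, stated in full; the proofs are below) =====
def Claim_equal_deviner_categorie : Prop := ∀ (chemin : String) (nom_fichier : String), Dom_deviner_categorie chemin nom_fichier → Spec_deviner_categorie chemin nom_fichier (deviner_categorie chemin nom_fichier)

-- ===== LEMMAS AND PROOFS =====

-- a fold of pvStep over keywords sharing one priority k is: if any matched and k improves, k, else the old best
lemma pv_fold_group (t : String) (ws : List String) (k b : Nat) :
    List.foldl (pvStep t) b (ws.map (fun w => (w, k))) =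
      if ws.any (fun mot => PySem.Str.isIn mot t) && decide (k < b) then k else b := by
  induction ws generalizing b with
  | nil => simp
  | cons w ws ih =>
    simp only [List.map_cons, List.foldl_cons, List.any_cons, pvStep]
    rw [ih]
    rcases Bool.eq_false_or_eq_true (PySem.Str.isIn w t) with hw | hw <;>
      simp only [hw] <;> by_cases hk : k < b <;> simp [hk]

lemma pvChem_groups : pvChemKeywords =
    (["contrat", "agreement", "convention"].map (fun w => (w, 0))) ++
    (["facture", "invoice", "paiement"].map (fun w => (w, 1))) ++
    (["courrier", "mail", "email", "lettre"].map (fun w => (w, 2))) ++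
    (["jugement", "tribunal", "audience"].map (fun w => (w, 3))) := rfl

lemma pvNom_groups : pvNomKeywords =
    (["contrat", "agreement"].map (fun w => (w, 4))) ++
    (["facture", "invoice"].map (fun w => (w, 5))) := rfl

-- ===== VERDICT (by name: the statement is the Claim_ definition above) =====
theorem deviner_categorie_spec : Claim_equal_deviner_categorie := by
  intro chemin nom_fichier _
  unfold Spec_deviner_categorie deviner_categorie deviner_categorie_alt
  dsimp only
  rw [pvChem_groups, pvNom_groups]
  rw [List.foldl_append, List.foldl_append, List.foldl_append, List.foldl_append]
  rw [pv_fold_group, pv_fold_group, pv_fold_group, pv_fold_group, pv_fold_group, pv_fold_group]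
  generalize ["contrat", "agreement", "convention"].any (fun mot => PySem.Str.isIn mot (PySem.Str.lower chemin)) = g0
  generalize ["facture", "invoice", "paiement"].any (fun mot => PySem.Str.isIn mot (PySem.Str.lower chemin)) = g1
  generalize ["courrier", "mail", "email", "lettre"].any (fun mot => PySem.Str.isIn mot (PySem.Str.lower chemin)) = g2
  generalize ["jugement", "tribunal", "audience"].any (fun mot => PySem.Str.isIn mot (PySem.Str.lower chemin)) = g3
  generalize ["contrat", "agreement"].any (fun mot => PySem.Str.isIn mot (PySem.Str.lower nom_fichier)) = g4
  generalize ["facture", "invoice"].any (fun mot => PySem.Str.isIn mot (PySem.Str.lower nom_fichier)) = g5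
  cases g0 <;> cases g1 <;> cases g2 <;> cases g3 <;> cases g4 <;> cases g5 <;> rfl
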